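-- pv_equiv track=rewrite | github.com/piotre10/fun-things | binary_sequences/main.py | sequence_is_legal
-- ===== SOURCE A (Python) =====
-- def sequence_is_legal(sequence: str) -> bool:
--     """Checks if sequence is legal as described in task"""
--     prev_is_one = False
--     for character in sequence:
--         if character == "0":
--             prev_is_one = False
--             continue
--
--         if character == "1":
--             if prev_is_one:
--                 return False
--
--             prev_is_one = True
--
--     return True
-- ===== SOURCE B (Python) =====
-- def sequence_is_legal(sequence: str) -> bool:
--     """Checks if sequence is legal as described in task"""
--     bits = ''.join(c for c in sequence if c in '01')
--     return '11' not in bits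
-- ===== Notes on version B (the rewrite author's own statement) =====
-- stated objective: simpler
-- what changed: Replaces the stateful prev-flag scan with an early return by a filter keeping only '0'/'1' characters followed by a substring test for '11'.
import Mathlib
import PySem

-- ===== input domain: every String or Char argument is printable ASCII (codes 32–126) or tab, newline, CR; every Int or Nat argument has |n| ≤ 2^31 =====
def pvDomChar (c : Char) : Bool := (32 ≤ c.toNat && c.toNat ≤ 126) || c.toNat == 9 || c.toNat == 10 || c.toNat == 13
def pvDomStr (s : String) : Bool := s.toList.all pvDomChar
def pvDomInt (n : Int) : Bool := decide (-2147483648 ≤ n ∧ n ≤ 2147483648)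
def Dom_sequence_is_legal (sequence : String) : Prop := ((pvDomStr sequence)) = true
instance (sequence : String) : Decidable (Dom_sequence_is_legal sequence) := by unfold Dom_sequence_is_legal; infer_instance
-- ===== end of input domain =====

-- B filters the input down to its '0'/'1' characters and tests for the substring "11",
-- replacing A's stateful prev-flag scan with early return (objective: simpler).


-- ===== PORT A =====
-- the for-loop with its prev_is_one flag and early 'return False'
def sequenceIsLegalLoop : List Char → Bool → Bool
  | [], _ => true
  | c :: rest, prev =>
    if c = '0' then sequenceIsLegalLoop rest false
    else if c = '1' then
      if prev then false else sequenceIsLegalLoop rest true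
    else sequenceIsLegalLoop rest prev

def sequence_is_legal (sequence : String) : Bool :=
  sequenceIsLegalLoop sequence.toList false

-- ===== PORT B =====
def sequence_is_legal_alt (sequence : String) : Bool :=
  let bits := sequence.toList.filter (fun c => c == '0' || c == '1')
  !(PySem.Chars.isIn "11".toList bits)

-- ===== PRECONDITION & SPEC =====
def Spec_sequence_is_legal (sequence : String) (out : Bool) : Prop := out = sequence_is_legal_alt sequence
instance (sequence : String) (out : Bool) : Decidable (Spec_sequence_is_legal sequence out) := by unfold Spec_sequence_is_legal; infer_instance

-- ===== CLAIM (what is proved, stated in full; the proofs are below) =====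
def Claim_equal_sequence_is_legal : Prop := ∀ (sequence : String), Dom_sequence_is_legal sequence → Spec_sequence_is_legal sequence (sequence_is_legal sequence)

-- ===== LEMMAS AND PROOFS =====

lemma isIn11_cons (c : Char) (t : List Char) :
    PySem.Chars.isIn ['1', '1'] (c :: t)
      = (((c == '1') && (t.head? == some '1')) || PySem.Chars.isIn ['1', '1'] t) := by
  rcases t with _ | ⟨d, t'⟩
  · have h1 : PySem.Chars.isIn ['1', '1'] [c] = false := by
      rw [PySem.Chars.isIn_eq_false_iff]
      intro h
      have := h.length_le
      simp at this
    have h2 : PySem.Chars.isIn ['1', '1'] ([] : List Char) = false := by decide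
    simp [h1, h2]
  · rw [Bool.eq_iff_iff]
    simp only [Bool.or_eq_true, Bool.and_eq_true, beq_iff_eq,
      PySem.Chars.isIn_iff_infix, List.infix_cons_iff, List.cons_prefix_cons,
      List.head?_cons, Option.some.injEq]
    constructor
    · rintro (⟨h1, h2, -⟩ | h)
      · exact Or.inl ⟨h1.symm, h2.symm⟩
      · exact Or.inr h
    · rintro (⟨h1, h2⟩ | h)
      · subst h1 h2
        exact Or.inl ⟨rfl, rfl, by simp⟩
      · exact Or.inr h

lemma loop_eq_isIn (l : List Char) (prev : Bool) :
    sequenceIsLegalLoop l prev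
      = !(PySem.Chars.isIn ['1', '1']
          ((if prev then ['1'] else []) ++ l.filter (fun c => c == '0' || c == '1'))) := by
  induction l generalizing prev with
  | nil =>
    cases prev <;> simp [sequenceIsLegalLoop] <;> decide
  | cons c rest ih =>
    by_cases h0 : c = '0'
    · subst h0
      rw [sequenceIsLegalLoop, if_pos rfl, ih]
      cases prev
      · simp [isIn11_cons]
      · simp [isIn11_cons]
    · by_cases h1 : c = '1'
      · subst h1
        rw [sequenceIsLegalLoop, if_neg (by decide), if_pos rfl]
        cases prev
        · rw [ih]
          simp
        · simp [isIn11_cons]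
      · rw [sequenceIsLegalLoop, if_neg h0, if_neg h1, ih]
        have : (c == '0' || c == '1') = false := by
          simp [h0, h1]
        simp [this]

-- ===== VERDICT (by name: the statement is the Claim_ definition above) =====
theorem sequence_is_legal_spec : Claim_equal_sequence_is_legal := by
  intro s _
  unfold Spec_sequence_is_legal sequence_is_legal sequence_is_legal_alt
  rw [loop_eq_isIn]
  simp
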